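-- pv_equiv track=rewrite | github.com/michael-s-downs/thethingineed | services/techhubinforetrieval/utils.py | get_exact_search
-- ===== SOURCE A (Python) =====
-- def get_exact_search(query: str):
--     """If the query is exactly in the text return it
--
--     Args:
--         query (str): Input query
--
--     Returns:
--         list: Exact queries
--     """
--     query_split = query.replace("?", "").split("\"")
--
--     queries_text = []
--     if len(query_split) > 1:
--         search = False
--         for i in range(len(query_split)):
--             if search:
--                 # Check if there is another quote closing chosen text
--                 if len(query_split) >= i + 2:
--                     queries_text.append(query_split[i].strip())
--                     search = False
--             else:
--                 search = True
--     return queries_text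
-- ===== SOURCE B (Python) =====
-- def get_exact_search(query: str):
--     """If the query is exactly in the text return it (quoted substrings, stripped)."""
--     parts = query.replace("?", "").split("\"")[1:]
--     out = []
--     while len(parts) >= 2:
--         out.append(parts[0].strip())
--         parts = parts[2:]
--     return out
-- ===== Notes on version B (the rewrite author's own statement) =====
-- stated objective: simpler
-- what changed: B drops A's toggling search flag, index loop and closing-quote length test: it discards everything before the first quote and consumes the remaining split segments two at a time, stripping the first of each pair.
import Mathlib
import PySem

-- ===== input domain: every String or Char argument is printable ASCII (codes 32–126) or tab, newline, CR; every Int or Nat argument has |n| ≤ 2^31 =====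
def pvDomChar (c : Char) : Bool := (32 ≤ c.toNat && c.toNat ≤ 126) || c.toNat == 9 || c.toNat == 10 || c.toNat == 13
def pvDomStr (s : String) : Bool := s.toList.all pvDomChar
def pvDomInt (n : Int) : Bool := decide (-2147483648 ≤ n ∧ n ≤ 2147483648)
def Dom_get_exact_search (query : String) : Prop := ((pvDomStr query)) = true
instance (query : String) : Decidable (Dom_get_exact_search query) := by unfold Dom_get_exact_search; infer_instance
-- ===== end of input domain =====

-- B replaces A's index loop with a toggling flag by pairwise consumption of the
-- segments after the first quote (simpler: no flag, no index arithmetic).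

-- ===== PORT A =====
def get_exact_search (query : String) : List String :=
  let qs := (PySem.Str.split? (PySem.Str.replace query "?" "") "\"").getD []
  let queries_text : List String := []
  if qs.length > 1 then
    ((PySem.List.pyRange 0 (PySem.List.len qs) 1).foldl
      (fun (st : Bool × List String) i =>
        if st.1 then
          if PySem.List.len qs ≥ i + 2 then
            (false, st.2 ++ [PySem.Str.strip (PySem.List.pyGetD qs i "")])
          else st
        else (true, st.2)) (false, queries_text)).2
  else queries_text

-- ===== PORT B =====
-- the 'while len(parts) >= 2' loop of Source B, with 'parts = parts[2:]' as the recursive call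
def altLoop (out : List String) : List String → List String
  | a :: _ :: rest => altLoop (out ++ [PySem.Str.strip a]) rest
  | _ => out

def get_exact_search_alt (query : String) : List String :=
  altLoop [] (PySem.List.slice ((PySem.Str.split? (PySem.Str.replace query "?" "") "\"").getD []) (some 1) none)

-- ===== PRECONDITION & SPEC =====
def Spec_get_exact_search (query : String) (out : List String) : Prop := out = get_exact_search_alt query
instance (query : String) (out : List String) : Decidable (Spec_get_exact_search query out) := by unfold Spec_get_exact_search; infer_instance

-- ===== CLAIM (what is proved, stated in full; the proofs are below) =====
def Claim_equal_get_exact_search : Prop := ∀ (query : String), Dom_get_exact_search query → Spec_get_exact_search query (get_exact_search query)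

-- ===== LEMMAS AND PROOFS =====

-- A's loop body over an arbitrary segment list
def aBody (qs : List String) (st : Bool × List String) (i : Int) : Bool × List String :=
  if st.1 then
    if PySem.List.len qs ≥ i + 2 then
      (false, st.2 ++ [PySem.Str.strip (PySem.List.pyGetD qs i "")])
    else st
  else (true, st.2)

theorem loop_eq (qs out : List String) :
    ((PySem.List.pyRange 0 (PySem.List.len qs) 1).foldl (aBody qs) (false, out)).2
      = altLoop out qs.tail := by
  match qs with
  | [] => simp [PySem.List.pyRange_one_eq_nil, altLoop]
  | [a] =>
      rw [show PySem.List.len [a] = (1 : Int) by simp,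
        PySem.List.pyRange_one_cons (by norm_num), PySem.List.pyRange_one_eq_nil (by norm_num)]
      simp [aBody, altLoop]
  | a :: b :: rest =>
      have hlen : PySem.List.len (a :: b :: rest) = (rest.length : Int) + 2 := by
        simp; omega
      rw [hlen, PySem.List.pyRange_one_cons (by omega), PySem.List.pyRange_one_cons (by omega)]
      simp only [List.foldl_cons]
      have h0 : aBody (a :: b :: rest) (false, out) 0 = (true, out) := by
        simp [aBody]
      rw [h0]
      match rest with
      | [] =>
          have h1 : aBody (a :: b :: []) (true, out) (0 + 1) = (true, out) := by
            simp [aBody]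
          rw [h1,
            show PySem.List.pyRange ((0:Int)+1+1) ((List.length ([]:List String) : Int) + 2) 1 = []
              from PySem.List.pyRange_one_eq_nil (by simp)]
          simp [altLoop]
      | c :: rest' =>
          have h1 : aBody (a :: b :: c :: rest') (true, out) (0 + 1)
              = (false, out ++ [PySem.Str.strip b]) := by
            unfold aBody
            rw [if_pos rfl, if_pos (by simp; omega)]
            norm_num [PySem.List.pyGetD, PySem.List.pyGet?, PySem.List.pyIdx?]
            rw [if_pos (by omega)]
            simp
          rw [h1]
          -- shift the remaining range by 2 and reduce to the tail list
          have hshift :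
              (PySem.List.pyRange (0+1+1) ((List.length (c :: rest') : Int) + 2) 1).foldl
                  (aBody (a :: b :: c :: rest')) (false, out ++ [PySem.Str.strip b])
                = (PySem.List.pyRange 0 (PySem.List.len (c :: rest')) 1).foldl
                  (aBody (c :: rest')) (false, out ++ [PySem.Str.strip b]) := by
            rw [PySem.List.pyRange_one, PySem.List.pyRange_one]
            rw [List.foldl_map, List.foldl_map]
            have hn : (((List.length (c :: rest') : Int) + 2) - (0+1+1)).toNat
                = ((PySem.List.len (c :: rest') : Int) - 0).toNat := by simp
            rw [hn]
            apply PySem.List.foldl_congr_mem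
            intro acc k _
            show aBody (a :: b :: c :: rest') acc (0+1+1 + (k:Int)) = aBody (c :: rest') acc (0 + (k:Int))
            unfold aBody
            have e1 : (0:Int)+1+1 + (k:Int) = ((k+1+1 : Nat) : Int) := by push_cast; ring
            have e2 : (0:Int) + (k:Int) = ((k : Nat) : Int) := by ring
            rw [e1, e2]
            have hcond : (PySem.List.len (a :: b :: c :: rest') ≥ ((k+1+1 : Nat) : Int) + 2)
                ↔ (PySem.List.len (c :: rest') ≥ ((k : Nat) : Int) + 2) := by
              simp; omega
            have hget : PySem.List.pyGetD (a :: b :: c :: rest') ((k+1+1 : Nat) : Int) ""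
                = PySem.List.pyGetD (c :: rest') ((k : Nat) : Int) "" := by
              rw [PySem.List.pyGetD_natCast, PySem.List.pyGetD_natCast]
              simp
            by_cases hs : acc.1
            · simp only [hs, if_true]
              by_cases hc : PySem.List.len (c :: rest') ≥ ((k : Nat) : Int) + 2
              · rw [if_pos hc, if_pos (hcond.mpr hc), hget]
              · rw [if_neg hc, if_neg (fun h => hc (hcond.mp h))]
            · simp only [hs]
              simp
          rw [hshift, loop_eq (c :: rest') (out ++ [PySem.Str.strip b])]
          simp [altLoop]

theorem core_eq (qs : List String) :
    (let queries_text : List String := []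
     if qs.length > 1 then
       ((PySem.List.pyRange 0 (PySem.List.len qs) 1).foldl (aBody qs) (false, queries_text)).2
     else queries_text) = altLoop [] qs.tail := by
  by_cases h : qs.length > 1
  · simp only [h, if_true]
    exact loop_eq qs []
  · simp only [h, if_false]
    match qs, h with
    | [], _ => simp [altLoop]
    | [a], _ => simp [altLoop]
    | a :: b :: rest, h => simp at h

-- ===== VERDICT (by name: the statement is the Claim_ definition above) =====
theorem get_exact_search_spec : Claim_equal_get_exact_search := by
  intro query _
  unfold Spec_get_exact_search get_exact_search get_exact_search_alt
  rw [PySem.List.slice_from_one]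
  exact core_eq _
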